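-- pv_equiv track=rewrite | github.com/tihanaujevic/algorithms_in_Bioinformatics | chapter4/BA4E.py | check_linear
-- ===== SOURCE A (Python) =====
-- def belongs_spectrum(candidate_spectrum, main_spectrum):
--     from collections import Counter
--
--     counter_c_spectrum = Counter(candidate_spectrum)
--     counter_m_spectrum = Counter(main_spectrum)
--
--     for key, count in counter_c_spectrum.items():
--         if key not in counter_m_spectrum:
--             return False
--         if count > counter_m_spectrum[key]:
--             return False
--     return True
--
-- def check_linear(spectrum, peptide):
--     parent_mass = max(spectrum)
--
--     n = len(peptide)
--
--     new_spectrum = [0]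
--
--     for l in range(n):
--         for k in range(1, n - l + 1):
--             subpeptide = peptide[l : l + k]
--             new_spectrum.append(sum(subpeptide))
--     new_spectrum = sorted(new_spectrum)
--
--     if sum(peptide) <= parent_mass and belongs_spectrum(
--         new_spectrum, spectrum
--     ):
--         return True
--
--     return False
-- ===== SOURCE B (Python) =====
-- def check_linear(spectrum, peptide):
--     from collections import Counter
--     if sum(peptide) > max(spectrum):
--         return False
--     sums = [0]
--     for l in range(len(peptide)):
--         s = 0
--         for x in peptide[l:]:
--             s += x
--             sums.append(s)
--     return not (Counter(sums) - Counter(spectrum))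
-- ===== Notes on version B (the rewrite author's own statement) =====
-- stated objective: faster
-- what changed: B replaces A's O(n^3) slice-and-sum enumeration of every subpeptide plus a sort of the whole spectrum by O(n^2) running suffix sums, an early exit on the parent-mass test, and a single Counter subtraction (no sort, no per-subpeptide slicing) for the multiset-inclusion check.
-- outside the precondition, e.g. on check_linear([], [1]): A raises ValueError, B raises ValueError
import Mathlib
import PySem

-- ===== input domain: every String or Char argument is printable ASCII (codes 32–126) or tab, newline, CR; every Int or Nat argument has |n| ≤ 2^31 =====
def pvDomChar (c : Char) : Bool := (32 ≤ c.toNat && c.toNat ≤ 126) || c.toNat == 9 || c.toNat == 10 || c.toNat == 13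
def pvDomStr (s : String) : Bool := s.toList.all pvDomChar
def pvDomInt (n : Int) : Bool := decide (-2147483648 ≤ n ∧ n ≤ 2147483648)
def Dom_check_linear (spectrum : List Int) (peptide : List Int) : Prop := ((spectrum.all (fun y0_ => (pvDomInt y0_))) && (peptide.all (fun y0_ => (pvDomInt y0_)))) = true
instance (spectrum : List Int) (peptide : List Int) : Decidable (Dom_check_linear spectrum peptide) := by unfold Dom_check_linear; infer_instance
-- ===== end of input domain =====

-- B replaces A's O(n^3) slice-and-sum of every subpeptide plus a sort by O(n^2) running
-- suffix sums and a Counter subtraction (no sort); return value only, no mutation.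

-- ===== PORT A =====
-- early-return loop over the candidate Counter's items (belongs_spectrum's for loop)
def belongsLoop (cm : PySem.Dict Int Int) : List (Int × Int) → Bool
  | [] => true
  | (key, count) :: rest =>
    if cm.contains key = false then false
    else if count > cm.getD key 0 then false
    else belongsLoop cm rest

def belongs_spectrum (candidate_spectrum main_spectrum : List Int) : Bool :=
  let counter_c_spectrum := PySem.Dict.counter candidate_spectrum
  let counter_m_spectrum := PySem.Dict.counter main_spectrum
  belongsLoop counter_m_spectrum counter_c_spectrum.items

def check_linear (spectrum : List Int) (peptide : List Int) : Bool :=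
  match PySem.List.max? spectrum (fun x => x) with
  | none => false  -- max([]) raises ValueError; excluded by Pre_check_linear
  | some parent_mass =>
    let n : Int := peptide.length
    let new_spectrum : List Int :=
      (PySem.List.pyRange 0 n 1).foldl (fun acc l =>
        (PySem.List.pyRange 1 (n - l + 1) 1).foldl (fun acc2 k =>
          let subpeptide := PySem.List.slice peptide (some l) (some (l + k))
          acc2 ++ [subpeptide.sum]) acc) [0]
    let new_spectrum' := PySem.List.sorted new_spectrum (fun x => x) false
    if decide (peptide.sum ≤ parent_mass) && belongs_spectrum new_spectrum' spectrum then
      true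
    else
      false

-- ===== PORT B =====
def check_linear_alt (spectrum : List Int) (peptide : List Int) : Bool :=
  match PySem.List.max? spectrum (fun x => x) with
  | none => false  -- max([]) raises ValueError; excluded by Pre_check_linear
  | some parent_mass =>
    if decide (peptide.sum > parent_mass) then false
    else
      let sums : List Int :=
        (PySem.List.pyRange 0 (peptide.length : Int) 1).foldl (fun acc l =>
          ((PySem.List.slice peptide (some l) none).foldl
            (fun (p : Int × List Int) x => (p.1 + x, p.2 ++ [p.1 + x])) ((0 : Int), acc)).2) [0]
      let cs := PySem.Dict.counter sums
      let cm := PySem.Dict.counter spectrum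
      -- Counter(sums) - Counter(spectrum): keep strictly positive differences
      let diff := cs.items.foldl (fun (d : PySem.Dict Int Int) kv =>
          let r := kv.2 - cm.getD kv.1 0
          if 0 < r then d.insert kv.1 r else d) PySem.Dict.empty
      decide (diff.size = 0)

-- ===== PRECONDITION & SPEC =====
-- Pre_ excludes only spectrum = [], on which Python's max(spectrum) raises ValueError.
def Pre_check_linear (spectrum : List Int) (peptide : List Int) : Prop := spectrum ≠ []
instance (spectrum : List Int) (peptide : List Int) : Decidable (Pre_check_linear spectrum peptide) := by unfold Pre_check_linear; infer_instance
def pvWitness_check_linear : List Int × List Int := ([0, 1, 2, 3, 3, 5, 6], [1, 2, 3])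

def Spec_check_linear (spectrum : List Int) (peptide : List Int) (out : Bool) : Prop := out = check_linear_alt spectrum peptide
instance (spectrum : List Int) (peptide : List Int) (out : Bool) : Decidable (Spec_check_linear spectrum peptide out) := by unfold Spec_check_linear; infer_instance

-- ===== CLAIM (what is proved, stated in full; the proofs are below) =====
def Claim_equal_check_linear : Prop := ∀ (spectrum : List Int) (peptide : List Int), Dom_check_linear spectrum peptide → Pre_check_linear spectrum peptide → Spec_check_linear spectrum peptide (check_linear spectrum peptide)

-- ===== LEMMAS AND PROOFS =====

-- A's early-return item loop is an `all` over the items list.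
lemma belongsLoop_eq_all (cm : PySem.Dict Int Int) (L : List (Int × Int)) :
    belongsLoop cm L = L.all (fun kv => cm.contains kv.1 && decide (kv.2 ≤ cm.getD kv.1 0)) := by
  induction L with
  | nil => rfl
  | cons kv rest ih =>
    obtain ⟨key, count⟩ := kv
    by_cases h : cm.contains key = true
    · by_cases h2 : count ≤ cm.getD key 0
      · simpa [belongsLoop, h, h2, not_lt.mpr h2] using ih
      · simp [belongsLoop, h, h2, lt_of_not_ge h2]
    · simp [belongsLoop, Bool.eq_false_iff.mpr h]

-- A's belongs_spectrum is the canonical multiset-inclusion test.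
lemma belongs_eq (ys s : List Int) :
    belongs_spectrum ys s = decide (∀ v ∈ ys, ys.count v ≤ s.count v) := by
  unfold belongs_spectrum
  rw [belongsLoop_eq_all, PySem.Dict.items_counter, List.all_map]
  rw [Bool.eq_iff_iff]
  simp only [List.all_eq_true, Function.comp, PySem.Dict.contains_counter,
    PySem.Dict.getD_counter, Bool.and_eq_true, decide_eq_true_iff, PySem.Set.mem_ofList,
    List.contains_eq_mem, Nat.cast_le]
  constructor
  · intro h v hv; exact (h v hv).2
  · intro h v hv
    refine ⟨?_, h v hv⟩
    have h1 : 0 < ys.count v := List.count_pos_iff.mpr hv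
    have h2 := h v hv
    simpa [List.count_pos_iff] using lt_of_lt_of_le h1 h2

-- running prefix sums
def prefSums : Int → List Int → List Int
  | _, [] => []
  | s, x :: t => (s + x) :: prefSums (s + x) t

lemma foldl_prefSums (ys : List Int) (s : Int) (acc : List Int) :
    (ys.foldl (fun (p : Int × List Int) x => (p.1 + x, p.2 ++ [p.1 + x])) (s, acc)).2
      = acc ++ prefSums s ys := by
  induction ys generalizing s acc with
  | nil => simp [prefSums]
  | cons x t ih => simp [prefSums, ih]

lemma prefSums_eq_map (ys : List Int) (s : Int) :
    prefSums s ys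
      = (PySem.List.pyRange 1 ((ys.length : Int) + 1) 1).map
          (fun k => s + ((ys.take k.toNat).sum)) := by
  induction ys generalizing s with
  | nil => simp [prefSums, PySem.List.pyRange_one_eq_nil]
  | cons x t ih =>
    rw [prefSums, PySem.List.pyRange_one_cons (by simp), List.map_cons, ih (s + x)]
    rw [PySem.List.pyRange_one, PySem.List.pyRange_one]
    have hlen : ((((x :: t).length : Int) + 1) - (1 + 1)).toNat = (((t.length : Int) + 1) - 1).toNat := by
      simp; omega
    rw [hlen, List.map_map, List.map_map]
    refine List.cons_eq_cons.mpr ⟨by simp, ?_⟩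
    apply List.map_congr_left
    intro k hk
    simp only [Function.comp]
    have h1 : ((1 : Int) + (k : Int)).toNat = k + 1 := by omega
    have h2 : ((1 : Int) + 1 + (k : Int)).toNat = k + 2 := by omega
    rw [h1, h2]
    simp [List.take_succ_cons]
    ring


lemma size_insert_pos (d : PySem.Dict Int Int) (k v : Int) : 0 < (d.insert k v).size := by
  rw [PySem.Dict.size_insert]
  by_cases hc : d.contains k = true
  · rw [if_pos hc]
    have hk : k ∈ d.keys := (PySem.Dict.contains_iff_mem_keys d k).mp hc
    have hne : d.keys ≠ [] := List.ne_nil_of_mem hk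
    have : 0 < d.keys.length := List.length_pos_of_ne_nil hne
    simpa [PySem.Dict.keys, PySem.Dict.size] using this
  · simp [hc]

-- B's Counter-subtraction loop yields the empty dict iff no candidate count exceeds cm's.
lemma diff_size_zero (cm : PySem.Dict Int Int) (L : List (Int × Int)) (d : PySem.Dict Int Int) :
    ((L.foldl (fun (d : PySem.Dict Int Int) kv =>
        let r := kv.2 - cm.getD kv.1 0
        if 0 < r then d.insert kv.1 r else d) d).size = 0)
      ↔ (d.size = 0 ∧ ∀ kv ∈ L, kv.2 ≤ cm.getD kv.1 0) := by
  induction L generalizing d with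
  | nil => simp
  | cons kv t ih =>
    simp only [List.foldl_cons]
    by_cases h : 0 < kv.2 - cm.getD kv.1 0
    · rw [if_pos h, ih]
      constructor
      · rintro ⟨hz, -⟩
        exact absurd hz (by have := size_insert_pos d kv.1 (kv.2 - cm.getD kv.1 0); omega)
      · rintro ⟨-, hall⟩
        have := hall kv (by simp)
        omega
    · rw [if_neg h, ih]
      constructor
      · rintro ⟨hz, hall⟩
        refine ⟨hz, ?_⟩
        intro p hp
        rcases List.mem_cons.mp hp with rfl | hp'
        · omega
        · exact hall p hp'
      · rintro ⟨hz, hall⟩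
        exact ⟨hz, fun p hp => hall p (List.mem_cons_of_mem _ hp)⟩

-- Both programs enumerate the same raw list of subpeptide sums.
lemma lists_eq (peptide : List Int) :
    (PySem.List.pyRange 0 (peptide.length : Int) 1).foldl (fun acc l =>
        ((PySem.List.slice peptide (some l) none).foldl
          (fun (p : Int × List Int) x => (p.1 + x, p.2 ++ [p.1 + x])) ((0 : Int), acc)).2) [0]
    = (PySem.List.pyRange 0 (peptide.length : Int) 1).foldl (fun acc l =>
        (PySem.List.pyRange 1 ((peptide.length : Int) - l + 1) 1).foldl (fun acc2 k =>
          acc2 ++ [(PySem.List.slice peptide (some l) (some (l + k))).sum]) acc) [0] := by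
  apply PySem.List.foldl_congr_mem
  intro acc l hl
  have hl' := (PySem.List.mem_pyRange_one).mp hl
  rw [PySem.List.foldl_append_singleton_eq_map]
  rw [PySem.List.slice_from peptide hl'.1, foldl_prefSums, prefSums_eq_map]
  congr 1
  have hlen : (((peptide.drop l.toNat).length : Int) + 1) = (peptide.length : Int) - l + 1 := by
    rw [List.length_drop]
    omega
  rw [hlen]
  apply List.map_congr_left
  intro k hk
  have hk' := (PySem.List.mem_pyRange_one).mp hk
  rw [PySem.List.slice_toNat peptide hl'.1 (by omega)]
  have ht : (l + k).toNat - l.toNat = k.toNat := by omega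
  rw [ht]
  omega

-- multiset inclusion is invariant under sorting; reshape to B's item form
lemma final_iff (E s : List Int) :
    (∀ v ∈ PySem.List.sorted E (fun x => x) false,
        (PySem.List.sorted E (fun x => x) false).count v ≤ s.count v)
      ↔ ∀ kv ∈ (PySem.Set.ofList E).map (fun k => (k, (E.count k : Int))),
          kv.2 ≤ (s.count kv.1 : Int) := by
  have hp := PySem.List.sorted_perm E (fun x => x) false
  constructor
  · rintro h kv hkv
    simp only [List.mem_map] at hkv
    obtain ⟨k', hk', rfl⟩ := hkv
    dsimp only
    have hkE : k' ∈ E := (PySem.Set.mem_ofList E k').mp hk'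
    have := h k' (hp.mem_iff.mpr hkE)
    rw [hp.count_eq] at this
    exact_mod_cast this
  · intro h v hv
    have hvE : v ∈ E := hp.mem_iff.mp hv
    have := h (v, (E.count v : Int)) (List.mem_map.mpr ⟨v, (PySem.Set.mem_ofList E v).mpr hvE, rfl⟩)
    dsimp only at this
    rw [hp.count_eq]
    exact_mod_cast this

-- ===== VERDICT (by name: the statement is the Claim_ definition above) =====
theorem check_linear_spec : Claim_equal_check_linear := by
  intro spectrum peptide _ hpre
  unfold Spec_check_linear check_linear check_linear_alt
  obtain ⟨m, hm⟩ : ∃ m, PySem.List.max? spectrum (fun x => x) = some m := by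
    cases h : PySem.List.max? spectrum (fun x => x) with
    | none => exact absurd ((PySem.List.max?_eq_none_iff spectrum (fun x => x)).mp h) hpre
    | some m => exact ⟨m, rfl⟩
  rw [hm]
  simp only []
  by_cases hs : peptide.sum ≤ m
  · simp only [hs, decide_true, Bool.true_and, not_lt.mpr hs, decide_false,
      Bool.false_eq_true, if_false]
    rw [belongs_eq, lists_eq]
    simp only [show ∀ (b : Bool), (if b = true then true else false) = b from fun b => by cases b <;> rfl]
    rw [decide_eq_decide, diff_size_zero]
    simp only [PySem.Dict.size_empty, PySem.Dict.items_counter, PySem.Dict.getD_counter, true_and]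
    exact final_iff _ spectrum
  · simp [hs, lt_of_not_ge hs]
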